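-- pv_equiv track=rewrite | github.com/dylancabral/ten-thousand | ten_thousand/game_logic.py | validate_keepers
-- ===== SOURCE A (Python) =====
-- from collections import Counter
--
-- def validate_keepers(dice_roll, dice_kept):
--     dice_roll_validation = Counter(dice_roll)
--     dice_kept_validation = Counter(dice_kept)
--
--     if len(dice_kept_validation) <= len(dice_roll_validation):
--         if all(dice_kept_validation[key] <= dice_roll_validation[key] for key in dice_kept_validation.keys()):
--             return True
--         return False
--     else:
--         return False
-- ===== SOURCE B (Python) =====
-- def validate_keepers(dice_roll, dice_kept):
--     remaining = list(dice_roll)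
--     for element in dice_kept:
--         if element in remaining:
--             remaining.remove(element)
--         else:
--             return False
--     return True
-- ===== Notes on version B (the rewrite author's own statement) =====
-- stated objective: simpler
-- what changed: Replaced the two Counter tables and count comparison by a single greedy pass that removes each kept die from a shrinking copy of the roll.
import Mathlib
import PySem

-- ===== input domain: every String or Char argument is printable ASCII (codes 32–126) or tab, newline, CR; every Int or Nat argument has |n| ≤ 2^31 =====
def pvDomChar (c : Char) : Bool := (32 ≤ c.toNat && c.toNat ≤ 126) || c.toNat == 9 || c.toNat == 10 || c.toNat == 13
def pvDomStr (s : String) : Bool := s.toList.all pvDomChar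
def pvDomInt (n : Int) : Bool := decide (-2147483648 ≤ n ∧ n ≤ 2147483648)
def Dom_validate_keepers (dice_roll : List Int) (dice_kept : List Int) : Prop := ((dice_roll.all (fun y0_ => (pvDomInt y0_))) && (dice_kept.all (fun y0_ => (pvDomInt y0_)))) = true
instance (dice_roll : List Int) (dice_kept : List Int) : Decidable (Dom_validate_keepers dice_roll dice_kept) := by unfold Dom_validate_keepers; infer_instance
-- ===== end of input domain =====

-- ===== PORT A =====
-- A builds Counter tables of both lists and compares counts key by key.
def validate_keepers (dice_roll : List Int) (dice_kept : List Int) : Bool :=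
  let dice_roll_validation := PySem.Dict.counter dice_roll
  let dice_kept_validation := PySem.Dict.counter dice_kept
  if dice_kept_validation.keys.length ≤ dice_roll_validation.keys.length then
    if dice_kept_validation.keys.all
        (fun key => dice_kept_validation.getD key 0 ≤ dice_roll_validation.getD key 0) then
      true
    else false
  else false

-- ===== PORT B =====
-- B (simpler): greedily remove each kept die from a shrinking copy of the roll.
def vkLoop (remaining : List Int) (kept : List Int) : Bool :=
  match kept with
  | [] => true
  | element :: rest =>
    match PySem.List.remove? remaining element with
    | some remaining' => vkLoop remaining' rest
    | none => false

def validate_keepers_alt (dice_roll : List Int) (dice_kept : List Int) : Bool :=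
  vkLoop dice_roll dice_kept

-- ===== PRECONDITION & SPEC =====
def Spec_validate_keepers (dice_roll : List Int) (dice_kept : List Int) (out : Bool) : Prop := out = validate_keepers_alt dice_roll dice_kept
instance (dice_roll : List Int) (dice_kept : List Int) (out : Bool) : Decidable (Spec_validate_keepers dice_roll dice_kept out) := by unfold Spec_validate_keepers; infer_instance

-- ===== CLAIM (what is proved, stated in full; the proofs are below) =====
def Claim_equal_validate_keepers : Prop := ∀ (dice_roll : List Int) (dice_kept : List Int), Dom_validate_keepers dice_roll dice_kept → Spec_validate_keepers dice_roll dice_kept (validate_keepers dice_roll dice_kept)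

-- ===== LEMMAS AND PROOFS =====

-- B's greedy loop succeeds iff kept is a sub-multiset of remaining.
theorem vkLoop_iff (kept remaining : List Int) :
    vkLoop remaining kept = true ↔ ∀ v ∈ kept, kept.count v ≤ remaining.count v := by
  induction kept generalizing remaining with
  | nil => simp [vkLoop]
  | cons x rest ih =>
    by_cases hx : x ∈ remaining
    · rw [vkLoop, PySem.List.remove?_eq_some_erase _ _ hx]
      have hx1 : 0 < remaining.count x := List.count_pos_iff.mpr hx
      simp only [ih]
      constructor
      · intro h v hv
        rw [List.mem_cons] at hv
        have hxr : rest.count x ≤ (remaining.erase x).count x := by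
          by_cases hxm : x ∈ rest
          · have := h x hxm
            omega
          · rw [List.count_eq_zero.mpr hxm]
            omega
        rcases hv with hv | hv
        · subst hv
          rw [List.count_erase] at hxr
          rw [List.count_cons]
          simp at hxr ⊢
          omega
        · by_cases hvx : v = x
          · subst hvx
            rw [List.count_erase] at hxr
            rw [List.count_cons]
            simp at hxr ⊢
            omega
          · have hne : x ≠ v := fun he => hvx he.symm
            have := h v hv
            rw [List.count_erase] at this
            rw [List.count_cons]
            simp [hne] at this ⊢
            omega
      · intro h v hv
        rw [List.count_erase]
        have hvm := h v (List.mem_cons_of_mem _ hv)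
        rw [List.count_cons] at hvm
        by_cases hvx : v = x
        · subst hvx
          simp at hvm ⊢
          omega
        · have hne : x ≠ v := fun he => hvx he.symm
          simp [hne] at hvm ⊢
          omega
    · rw [vkLoop, (PySem.List.remove?_eq_none_iff _ _).mpr hx]
      simp only [Bool.false_eq_true, false_iff]
      intro h
      have := h x List.mem_cons_self
      rw [List.count_cons, List.count_eq_zero.mpr hx] at this
      simp at this

-- A succeeds iff kept is a sub-multiset of roll.
theorem validate_keepers_iff (dice_roll dice_kept : List Int) :
    validate_keepers dice_roll dice_kept = true ↔
      ∀ v ∈ dice_kept, dice_kept.count v ≤ dice_roll.count v := by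
  unfold validate_keepers
  simp only [PySem.Dict.keys_counter, PySem.Dict.getD_counter, List.all_eq_true,
    decide_eq_true_eq, Nat.cast_le]
  constructor
  · intro h v hv
    split_ifs at h with h1 h2
    exact h2 v ((PySem.Set.mem_ofList _ _).mpr hv)
  · intro h
    have hsub : PySem.Set.ofList dice_kept ⊆ PySem.Set.ofList dice_roll := by
      intro x hx
      have hxk := (PySem.Set.mem_ofList _ _).mp hx
      have hle := h x hxk
      have hp : 0 < dice_roll.count x := by
        have := List.count_pos_iff.mpr hxk
        omega
      exact (PySem.Set.mem_ofList _ _).mpr (List.count_pos_iff.mp hp)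
    have hlen : (PySem.Set.ofList dice_kept).length ≤ (PySem.Set.ofList dice_roll).length :=
      ((PySem.Set.nodup_ofList _).subperm hsub).length_le
    rw [if_pos hlen, if_pos]
    intro v hv
    exact h v ((PySem.Set.mem_ofList _ _).mp hv)

-- ===== VERDICT (by name: the statement is the Claim_ definition above) =====
theorem validate_keepers_spec : Claim_equal_validate_keepers := by
  intro dice_roll dice_kept _
  unfold Spec_validate_keepers validate_keepers_alt
  rcases hb : vkLoop dice_roll dice_kept with _ | _
  · rcases ha : validate_keepers dice_roll dice_kept with _ | _
    · rfl
    · exact absurd ((vkLoop_iff _ _).mpr ((validate_keepers_iff _ _).mp ha)) (by simp [hb])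
  · exact (validate_keepers_iff _ _).mpr ((vkLoop_iff _ _).mp hb)
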